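-- pv_equiv track=rewrite | github.com/practual/advent_of_code_2017 | day1/day1.py | captcha_output_part_2
-- ===== SOURCE A (Python) =====
-- def captcha_output_part_2(captcha):
--     if len(captcha) % 2:
--         raise Exception('Captcha has an odd number of digits - cannot compute output.')
--     step = int(len(captcha) / 2)
--     partial_sum = 0
--     for i in range(len(captcha)):
--         next_i = (i + step) % len(captcha)
--         if captcha[i] == captcha[next_i]:
--             partial_sum += int(captcha[i])
--     return partial_sum
-- ===== SOURCE B (Python) =====
-- def captcha_output_part_2(captcha):
--     if len(captcha) % 2:
--         raise Exception('Captcha has an odd number of digits - cannot compute output.')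
--     half = len(captcha) // 2
--     return sum(2 * int(a) for a, b in zip(captcha[:half], captcha[half:]) if a == b)
-- ===== Notes on version B (the rewrite author's own statement) =====
-- stated objective: alternative
-- what changed: B splits the string into its two halves, zips them, and sums 2*int(a) over the matching pairs (half the comparisons, no modular indexing), instead of A's full-length index loop with (i+step)%n; correct because each matching pair (i,i+half) contributes twice in A's loop.
import Mathlib
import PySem

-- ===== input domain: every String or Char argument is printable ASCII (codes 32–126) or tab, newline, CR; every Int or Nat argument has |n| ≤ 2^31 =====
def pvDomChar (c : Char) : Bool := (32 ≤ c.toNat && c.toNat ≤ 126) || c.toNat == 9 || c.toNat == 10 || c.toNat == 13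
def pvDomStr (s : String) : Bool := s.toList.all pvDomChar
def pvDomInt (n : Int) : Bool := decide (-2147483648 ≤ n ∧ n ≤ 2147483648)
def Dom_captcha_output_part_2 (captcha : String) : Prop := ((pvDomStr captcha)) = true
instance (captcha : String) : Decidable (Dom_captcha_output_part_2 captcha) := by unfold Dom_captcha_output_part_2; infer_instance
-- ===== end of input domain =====

-- B zips the two halves of the string and sums 2*int(a) over the matching pairs,
-- instead of A's full-length index loop with modular indexing (alternative decomposition).

-- ===== PORT A =====
-- Literal port of A. Where the Python raises (odd length; int() of a matching non-digit char),
-- the port returns a default (0) — those inputs are excluded by Pre_.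
-- int(len/2) equals floor division for the even lengths admitted by Pre_.
def captcha_output_part_2 (captcha : String) : Int :=
  let l := captcha.toList
  let n : Int := (l.length : Int)
  if PySem.Int.mod n 2 ≠ 0 then 0  -- Python: raise Exception(...)
  else
    let step : Int := PySem.Int.floordiv n 2
    List.foldl (fun s i =>
        let nextI := PySem.Int.mod (i + step) n
        if PySem.List.pyGetD l i ' ' = PySem.List.pyGetD l nextI ' ' then
          s + (PySem.Int.ofChars? [PySem.List.pyGetD l i ' ']).getD 0
        else s)
      0 (PySem.List.pyRange 0 n 1)

-- ===== PORT B =====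
-- captcha[:half] / captcha[half:] are List.take / List.drop (exact for 0 ≤ half ≤ len);
-- the generator-expression sum is zip → filter/map via an if → List.sum.
def captcha_output_part_2_alt (captcha : String) : Int :=
  let l := captcha.toList
  if l.length % 2 ≠ 0 then 0  -- Python: raise Exception(...)
  else
    let half := l.length / 2
    (((l.take half).zip (l.drop half)).map
      (fun p => if p.1 = p.2 then 2 * (PySem.Int.ofChars? [p.1]).getD 0 else 0)).sum

-- ===== PRECONDITION & SPEC =====
-- Pre_ excludes exactly the inputs where the Python A raises: odd-length strings (explicit
-- Exception) and strings where some compared pair matches on a non-digit character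
-- (int() raises ValueError).
def Pre_captcha_output_part_2 (captcha : String) : Prop :=
  captcha.toList.length % 2 = 0 ∧
  ∀ k ∈ List.range (captcha.toList.length / 2),
    captcha.toList.getD k ' ' = captcha.toList.getD (k + captcha.toList.length / 2) ' ' →
    (captcha.toList.getD k ' ').isDigit = true
instance (captcha : String) : Decidable (Pre_captcha_output_part_2 captcha) := by
  unfold Pre_captcha_output_part_2; infer_instance
def pvWitness_captcha_output_part_2 : String := "1212"

def Spec_captcha_output_part_2 (captcha : String) (out : Int) : Prop := out = captcha_output_part_2_alt captcha
instance (captcha : String) (out : Int) : Decidable (Spec_captcha_output_part_2 captcha out) := by unfold Spec_captcha_output_part_2; infer_instance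

-- ===== CLAIM (what is proved, stated in full; the proofs are below) =====
def Claim_equal_captcha_output_part_2 : Prop := ∀ (captcha : String), Dom_captcha_output_part_2 captcha → Pre_captcha_output_part_2 captcha → Spec_captcha_output_part_2 captcha (captcha_output_part_2 captcha)

-- ===== LEMMAS AND PROOFS =====

-- Turn A's loop body into a pure accumulation, so foldl_add applies.
theorem pv_if_add {c : Prop} [Decidable c] (s v : Int) :
    (if c then s + v else s) = s + (if c then v else 0) := by
  split <;> simp

-- The zip of the two halves of l (length h + h) pairs l[k] with l[k+h].
theorem pv_zip_halves (l : List Char) (h : Nat) (hh : l.length = h + h) :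
    (l.take h).zip (l.drop h)
      = (List.range h).map (fun k => (l.getD k ' ', l.getD (k + h) ' ')) := by
  apply List.ext_getElem
  · simp [hh]
  · intro i h1 h2
    have hi : i < h := by simpa using h2
    have hi1 : i < l.length := by omega
    have hi2 : i + h < l.length := by omega
    simp [List.getElem_zip, List.getElem_take, List.getElem_drop,
      List.getD_eq_getElem?_getD, hi1, hi2, Nat.add_comm h i]

-- ===== VERDICT (by name: the statement is the Claim_ definition above) =====
theorem captcha_output_part_2_spec : Claim_equal_captcha_output_part_2 := by
  intro captcha _ hpre
  unfold Spec_captcha_output_part_2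
  obtain ⟨heven, -⟩ := hpre
  unfold captcha_output_part_2 captcha_output_part_2_alt
  simp only []
  set l := captcha.toList with hldef
  obtain ⟨h, hh⟩ : ∃ h, l.length = h + h := ⟨l.length / 2, by omega⟩
  have hmod : PySem.Int.mod ((l.length : Nat) : Int) 2 = 0 := by
    have := PySem.Int.mod_natCast l.length 2
    simp only [Nat.cast_ofNat] at this
    rw [this]; exact_mod_cast heven
  have hstep : PySem.Int.floordiv ((l.length : Nat) : Int) 2 = (h : Int) := by
    have := PySem.Int.floordiv_natCast l.length 2
    simp only [Nat.cast_ofNat] at this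
    rw [this]; congr 1; omega
  have hhalf : l.length / 2 = h := by omega
  rw [if_neg (fun hc => hc hmod), if_neg (fun hc => hc heven), hstep, hhalf]
  -- B side: the zip of the halves as a map over range h
  rw [pv_zip_halves l h hh, List.map_map]
  -- A side: unfold the range into a fold over List.range
  rw [show ((l.length : Nat) : Int) = ((h + h : Nat) : Int) by exact congrArg Nat.cast hh]
  rw [PySem.List.pyRange_zero_natCast, List.foldl_map]
  have eA : (fun (s : Int) (k : Nat) =>
        let nextI := PySem.Int.mod (((k : Nat) : Int) + (h : Int)) ((h + h : Nat) : Int)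
        if PySem.List.pyGetD l ((k : Nat) : Int) ' ' = PySem.List.pyGetD l nextI ' ' then
          s + (PySem.Int.ofChars? [PySem.List.pyGetD l ((k : Nat) : Int) ' ']).getD 0
        else s)
      = (fun (s : Int) (k : Nat) => s +
          (if l.getD k ' ' = l.getD ((k + h) % (h + h)) ' ' then
            (PySem.Int.ofChars? [l.getD k ' ']).getD 0 else 0)) := by
    funext s k
    have hmodk : PySem.Int.mod (((k : Nat) : Int) + (h : Int)) ((h + h : Nat) : Int)
        = (((k + h) % (h + h) : Nat) : Int) := by
      rw [show ((k : Nat) : Int) + (h : Int) = (((k + h : Nat)) : Int) by push_cast; ring]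
      exact PySem.Int.mod_natCast _ _
    simp only [hmodk, PySem.List.pyGetD_natCast]
    exact pv_if_add _ _
  rw [eA, PySem.List.foldl_add, zero_add]
  -- split the full range into the two halves and pair them up
  rw [List.range_add, List.map_append, List.sum_append, List.map_map]
  rw [← PySem.List.sum_map_add_int]
  apply congrArg
  apply List.map_congr_left
  intro k hk
  have hkh : k < h := List.mem_range.mp hk
  have m1 : (k + h) % (h + h) = k + h := Nat.mod_eq_of_lt (by omega)
  have m2 : (h + k + h) % (h + h) = k := by
    have : h + k + h = (h + h) + k := by ring
    rw [this, Nat.add_mod_left]; exact Nat.mod_eq_of_lt (by omega)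
  simp only [Function.comp, m1, m2]
  by_cases c : l.getD k ' ' = l.getD (k + h) ' '
  · have c' : l.getD (h + k) ' ' = l.getD k ' ' := by rw [Nat.add_comm h k, ← c]
    rw [if_pos c, if_pos c', if_pos c, c']
    ring
  · have c' : ¬ l.getD (h + k) ' ' = l.getD k ' ' := by
      rw [Nat.add_comm h k]; exact fun e => c e.symm
    rw [if_neg c, if_neg c', if_neg c]
    ring
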